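-- pv_equiv track=rewrite | github.com/emilykl/advent-of-code-2024 | day07/day07.py | could_be_true
-- ===== SOURCE A (Python) =====
-- from itertools import product
--
-- def could_be_true(equation):
--     test_value, values = equation
--
--     operations = {
--         "+": lambda x, y: x+y,
--         "*": lambda x, y: x*y
--     }
--
--     for combo in product(operations.keys(), repeat=len(values)-1):
--         result = values[0]
--         for op, v in zip(combo, values[1:]):
--             result = operations[op](result, v)
--         if result == test_value:
--             return True
--     return False
-- ===== SOURCE B (Python) =====
-- def could_be_true(equation):
--     target, values = equation
--
--     def reach(t, rev):
--         v, rest = rev[0], rev[1:]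
--         if not rest:
--             return t == v
--         if reach(t - v, rest):
--             return True
--         if v != 0:
--             return t % v == 0 and reach(t // v, rest)
--         return t == 0
--
--     return reach(target, list(reversed(values)))
-- ===== Notes on version B (the rewrite author's own statement) =====
-- stated objective: faster
-- what changed: Replaces A's forward enumeration of all 2^(n-1) operator combinations via itertools.product with a backward recursion from the target that subtracts the last value and only divides when it divides evenly, pruning branches and exiting early.
import Mathlib
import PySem

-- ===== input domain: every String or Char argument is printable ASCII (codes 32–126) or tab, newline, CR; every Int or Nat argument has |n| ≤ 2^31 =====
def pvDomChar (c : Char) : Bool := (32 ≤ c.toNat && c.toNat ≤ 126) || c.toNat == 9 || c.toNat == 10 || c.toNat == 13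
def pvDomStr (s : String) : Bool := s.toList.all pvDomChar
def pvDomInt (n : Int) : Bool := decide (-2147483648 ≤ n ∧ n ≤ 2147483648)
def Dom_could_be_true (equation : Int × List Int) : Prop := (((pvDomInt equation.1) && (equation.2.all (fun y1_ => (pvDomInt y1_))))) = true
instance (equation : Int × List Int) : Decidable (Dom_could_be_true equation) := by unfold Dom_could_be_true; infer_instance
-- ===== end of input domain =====

-- B replaces A's forward enumeration of all 2^(n-1) operator tuples by a backward
-- recursion from the target with subtraction/divisibility pruning and early exit
-- (objective: faster on typical inputs; same worst case).

-- ===== PORT A =====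
-- operations[op](x, y): the two-entry dict lookup, branch order "+", "*"
def applyOp (op : String) (x y : Int) : Int := if op = "+" then x + y else x * y

-- itertools.product(keys, repeat=n), first coordinate varying slowest
def pyProduct (keys : List String) : Nat → List (List String)
  | 0 => [[]]
  | n + 1 => keys.flatMap (fun k => (pyProduct keys n).map (fun c => k :: c))

def could_be_true (equation : Int × List Int) : Bool :=
  match equation with
  | (_, []) => false  -- Python raises ValueError here (product(repeat=-1)); outside Pre_
  | (test_value, v0 :: rest) =>
    (pyProduct ["+", "*"] rest.length).any (fun combo =>
      ((combo.zip rest).foldl (fun result p => applyOp p.1 result p.2) v0) == test_value)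

-- ===== PORT B =====
-- reach(t, rev): rev is the (reversed) remaining values; can ops over them make t?
def reach (t : Int) : List Int → Bool
  | [] => false  -- Python raises IndexError (rev[0]) here; outside Pre_
  | [v] => t == v
  | v :: r :: rest =>
      reach (t - v) (r :: rest) ||
        (if v != 0 then (PySem.Int.mod t v == 0) && reach (PySem.Int.floordiv t v) (r :: rest)
         else t == 0)

def could_be_true_alt (equation : Int × List Int) : Bool :=
  reach equation.1 equation.2.reverse

-- ===== PRECONDITION & SPEC =====
-- On an empty value list A raises ValueError (itertools.product with repeat=-1), so it is excluded.
def Pre_could_be_true (equation : Int × List Int) : Prop := equation.2 ≠ []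
instance (equation : Int × List Int) : Decidable (Pre_could_be_true equation) := by unfold Pre_could_be_true; infer_instance
def pvWitness_could_be_true : (Int × List Int) := (6, [2, 3])

def Spec_could_be_true (equation : Int × List Int) (out : Bool) : Prop := out = could_be_true_alt equation
instance (equation : Int × List Int) (out : Bool) : Decidable (Spec_could_be_true equation out) := by unfold Spec_could_be_true; infer_instance

-- ===== CLAIM (what is proved, stated in full; the proofs are below) =====
def Claim_equal_could_be_true : Prop := ∀ (equation : Int × List Int), Dom_could_be_true equation → Pre_could_be_true equation → Spec_could_be_true equation (could_be_true equation)

-- ===== LEMMAS AND PROOFS =====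

-- all values obtainable from accumulator acc by applying +v / *v over the list, in A's order
def results (acc : Int) : List Int → List Int
  | [] => [acc]
  | v :: vs => results (acc + v) vs ++ results (acc * v) vs

theorem results_ne_nil (acc : Int) (l : List Int) : results acc l ≠ [] := by
  induction l generalizing acc with
  | nil => simp [results]
  | cons v vs ih => simp [results]; exact fun h => absurd h (ih _)

theorem results_append (acc v : Int) (l : List Int) :
    results acc (l ++ [v]) = (results acc l).flatMap (fun r => [r + v, r * v]) := by
  induction l generalizing acc with
  | nil => simp [results]
  | cons x xs ih => simp [results, ih]

theorem mul_eq_iff_floordiv (v t r : Int) (hv : v ≠ 0) :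
    r * v = t ↔ (PySem.Int.mod t v = 0 ∧ r = PySem.Int.floordiv t v) := by
  constructor
  · rintro rfl
    have hd : v ∣ r * v := Dvd.intro_left r rfl
    have hm : PySem.Int.mod (r * v) v = 0 := (PySem.Int.mod_eq_zero_iff_dvd _ _).mpr hd
    refine ⟨hm, ?_⟩
    have := PySem.Int.floordiv_mul_add_mod (r * v) v
    rw [hm, add_zero] at this
    exact (mul_right_cancel₀ hv this).symm
  · rintro ⟨hm, rfl⟩
    have := PySem.Int.floordiv_mul_add_mod t v
    rw [hm, add_zero] at this
    exact this

theorem A_eq (rest : List Int) (acc t : Int) :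
    (pyProduct ["+", "*"] rest.length).any (fun combo =>
      ((combo.zip rest).foldl (fun result p => applyOp p.1 result p.2) acc) == t)
    = (results acc rest).any (· == t) := by
  induction rest generalizing acc with
  | nil => simp [pyProduct, results]
  | cons v vs ih =>
    simp only [List.length_cons, pyProduct, List.flatMap_cons, List.flatMap_nil,
      List.any_append, List.any_map, List.append_nil, Function.comp_def,
      List.zip_cons_cons, List.foldl_cons, results]
    rw [show applyOp "+" acc v = acc + v from by simp [applyOp],
      show applyOp "*" acc v = acc * v from by simp [applyOp],
      ih (acc + v), ih (acc * v)]

theorem reach_cons (t v : Int) (l : List Int) (hl : l ≠ []) :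
    reach t (v :: l) =
      (reach (t - v) l ||
        (if v != 0 then (PySem.Int.mod t v == 0) && reach (PySem.Int.floordiv t v) l
         else t == 0)) := by
  cases l with
  | nil => exact absurd rfl hl
  | cons x xs => rfl

theorem B_eq (w : List Int) (v0 t : Int) :
    reach t (w ++ [v0]) = (results v0 w.reverse).any (· == t) := by
  induction w generalizing t with
  | nil => simp [reach, results, eq_comm]
  | cons v w' ih =>
    rw [List.cons_append, reach_cons t v (w' ++ [v0]) (by simp),
      List.reverse_cons, results_append]
    simp only [ih, List.any_flatMap]
    by_cases hv : v = 0
    · subst hv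
      rw [if_neg (by simp)]
      rw [Bool.eq_iff_iff]
      simp only [List.any_eq_true, beq_iff_eq, List.any_cons, List.any_nil,
        Bool.or_false, Bool.or_eq_true, decide_eq_true_eq]
      constructor
      · rintro (⟨r, hr, rfl⟩ | rfl)
        · exact ⟨_, hr, Or.inl (by omega)⟩
        · obtain ⟨r, hr⟩ := List.exists_mem_of_ne_nil _ (results_ne_nil v0 w'.reverse)
          exact ⟨r, hr, Or.inr (by ring)⟩
      · rintro ⟨r, hr, h | h⟩
        · exact Or.inl ⟨r, hr, by omega⟩
        · exact Or.inr (by omega)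
    · rw [if_pos (show (v != 0) = true from by simp [hv])]
      rw [Bool.eq_iff_iff]
      simp only [List.any_eq_true, beq_iff_eq, List.any_cons, List.any_nil,
        Bool.or_false, Bool.or_eq_true, Bool.and_eq_true]
      constructor
      · rintro (⟨r, hr, rfl⟩ | ⟨hm, r, hr, rfl⟩)
        · exact ⟨_, hr, Or.inl (by ring)⟩
        · exact ⟨_, hr, Or.inr ((mul_eq_iff_floordiv v t _ hv).mpr ⟨hm, rfl⟩)⟩
      · rintro ⟨r, hr, h | h⟩
        · exact Or.inl ⟨r, hr, by omega⟩
        · obtain ⟨hm, hr'⟩ := (mul_eq_iff_floordiv v t r hv).mp h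
          exact Or.inr ⟨hm, r, hr, hr'⟩

-- ===== VERDICT (by name: the statement is the Claim_ definition above) =====
theorem could_be_true_spec : Claim_equal_could_be_true := by
  intro equation _ hpre
  obtain ⟨t, values⟩ := equation
  cases values with
  | nil => exact absurd rfl hpre
  | cons v0 rest =>
    show could_be_true (t, v0 :: rest) = could_be_true_alt (t, v0 :: rest)
    unfold could_be_true could_be_true_alt
    simp only [List.reverse_cons]
    rw [B_eq rest.reverse v0 t, List.reverse_reverse, A_eq]
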